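-- pv_equiv track=rewrite | github.com/tetraminz/sales-protocol | src/dialogs/judge/contracts.py | normalized_rule_keys
-- ===== SOURCE A (Python) =====
-- from collections import Counter
-- from collections.abc import Sequence
--
-- def normalized_rule_keys(rule_keys: Sequence[str]) -> tuple[str, ...]:
--     """Нормализует список ключей правил и проверяет базовые инварианты."""
--
--     keys = tuple(str(key).strip() for key in rule_keys if str(key).strip())
--     if not keys:
--         raise ValueError("rule_keys must not be empty")
--
--     duplicates = [key for key, count in Counter(keys).items() if count > 1]
--     if duplicates:
--         raise ValueError(f"rule_keys contain duplicates: {sorted(duplicates)}")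
--
--     return keys
-- ===== SOURCE B (Python) =====
-- def normalized_rule_keys(rule_keys):
--     """Sort-then-scan: duplicates are found by comparing neighbours in sorted order."""
--     keys = []
--     for key in rule_keys:
--         s = str(key).strip()
--         if s:
--             keys.append(s)
--     if not keys:
--         raise ValueError("rule_keys must not be empty")
--     srt = sorted(keys)
--     dups = []
--     for i in range(1, len(srt)):
--         if srt[i] == srt[i - 1] and (not dups or dups[-1] != srt[i]):
--             dups.append(srt[i])
--     if dups:
--         raise ValueError(f"rule_keys contain duplicates: {dups}")
--     return tuple(keys)
-- ===== Notes on version B (the rewrite author's own statement) =====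
-- stated objective: alternative
-- what changed: Duplicate detection no longer uses a Counter/hash multiset: B builds the normalized list in one explicit loop, then sorts it and finds duplicates by comparing adjacent neighbours in the sorted order.
import Mathlib
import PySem

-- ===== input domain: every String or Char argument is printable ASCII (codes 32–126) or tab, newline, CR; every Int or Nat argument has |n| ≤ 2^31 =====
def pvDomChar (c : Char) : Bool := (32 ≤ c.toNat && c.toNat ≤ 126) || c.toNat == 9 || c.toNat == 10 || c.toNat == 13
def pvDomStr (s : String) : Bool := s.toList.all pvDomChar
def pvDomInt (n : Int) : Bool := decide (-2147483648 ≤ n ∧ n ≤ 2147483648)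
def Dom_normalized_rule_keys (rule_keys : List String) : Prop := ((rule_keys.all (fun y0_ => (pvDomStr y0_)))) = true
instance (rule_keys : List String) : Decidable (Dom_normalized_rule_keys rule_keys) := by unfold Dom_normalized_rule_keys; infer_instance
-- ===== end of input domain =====

-- B replaces A's Counter-based duplicate detection: it builds the normalized list in one
-- explicit loop, then SORTS it and finds duplicates by comparing adjacent neighbours;
-- objective: alternative. Inputs on which A raises ValueError (all keys empty after
-- stripping, or duplicate stripped keys) are excluded by Pre_: B raises the same error there.


-- ===== PORT A =====
-- keys = tuple(str(key).strip() for key in rule_keys if str(key).strip());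
-- raise if empty; duplicates via Counter; raise if any; else return keys.
-- The two 'raise ValueError' branches return [] (those inputs are outside Pre_).
def normalized_rule_keys (rule_keys : List String) : List String :=
  let keys := (rule_keys.map (fun k => PySem.Str.strip k)).filter (fun s => s ≠ "")
  if keys = [] then []
  else
    let duplicates :=
      (((PySem.Dict.counter keys).items).filter (fun kc => kc.2 > 1)).map (fun kc => kc.1)
    if duplicates ≠ [] then []
    else keys

-- ===== PORT B =====
-- the 'for i in range(1, len(srt))' loop: walk the sorted list pairwise, appending srt[i]
-- to dups when it equals its left neighbour and is not already the last collected duplicate.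
def pvAdjScan (dups : List String) : List String → List String
  | [] => dups
  | [_] => dups
  | a :: b :: rest =>
      if b = a ∧ (dups = [] ∨ dups.getLast? ≠ some b)
      then pvAdjScan (dups ++ [b]) (b :: rest)
      else pvAdjScan dups (b :: rest)

-- B: one loop builds keys; raise if empty; sort; adjacent scan for duplicates; raise if any.
-- The two 'raise ValueError' branches return [] (those inputs are outside Pre_).
def normalized_rule_keys_alt (rule_keys : List String) : List String :=
  let keys := rule_keys.foldl (fun acc k =>
      if PySem.Str.strip k ≠ "" then acc ++ [PySem.Str.strip k] else acc) []
  if keys = [] then []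
  else
    let srt := PySem.List.sorted keys (fun x => x) false
    let dups := pvAdjScan [] srt
    if dups ≠ [] then [] else keys

-- ===== PRECONDITION & SPEC =====
-- Pre_ excludes exactly the inputs on which A raises ValueError: those whose keys are all
-- empty after stripping, or whose stripped non-empty keys contain duplicates (B raises the
-- same ValueError there).
def Pre_normalized_rule_keys (rule_keys : List String) : Prop :=
  let keys := (rule_keys.map (fun k => PySem.Str.strip k)).filter (fun s => s ≠ "")
  keys ≠ [] ∧ keys.Nodup
instance (rule_keys : List String) : Decidable (Pre_normalized_rule_keys rule_keys) := by
  unfold Pre_normalized_rule_keys; infer_instance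

def pvWitness_normalized_rule_keys : List String := ["a", " b ", "", "c"]

def Spec_normalized_rule_keys (rule_keys : List String) (out : List String) : Prop :=
  out = normalized_rule_keys_alt rule_keys
instance (rule_keys : List String) (out : List String) :
    Decidable (Spec_normalized_rule_keys rule_keys out) := by
  unfold Spec_normalized_rule_keys; infer_instance

-- ===== CLAIM =====
def Claim_equal_normalized_rule_keys : Prop :=
  ∀ (rule_keys : List String), Dom_normalized_rule_keys rule_keys →
    Pre_normalized_rule_keys rule_keys →
    Spec_normalized_rule_keys rule_keys (normalized_rule_keys rule_keys)

-- ===== LEMMAS AND PROOFS =====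

-- B's keys-building loop appends exactly the non-empty stripped keys.
theorem keys_fold (xs : List String) (acc : List String) :
    xs.foldl (fun acc k =>
      if PySem.Str.strip k ≠ "" then acc ++ [PySem.Str.strip k] else acc) acc
      = acc ++ (xs.map (fun k => PySem.Str.strip k)).filter (fun s => s ≠ "") := by
  induction xs generalizing acc with
  | nil => simp
  | cons x xs ih =>
    rw [List.foldl_cons]
    by_cases hx : PySem.Str.strip x = ""
    · rw [if_neg (by simp [hx]), ih]
      simp [hx]
    · rw [if_pos hx, ih]
      simp [hx]

-- on a Nodup list the adjacent scan collects nothing.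
theorem adjScan_nodup (xs : List String) (dups : List String) (h : xs.Nodup) :
    pvAdjScan dups xs = dups := by
  induction xs generalizing dups with
  | nil => rfl
  | cons a xs ih =>
    cases xs with
    | nil => rfl
    | cons b rest =>
      have hab : b ≠ a := by
        intro he; exact (List.nodup_cons.mp h).1 (he ▸ List.mem_cons_self)
      rw [pvAdjScan, if_neg (by simp [hab])]
      exact ih dups (List.nodup_cons.mp h).2

-- A's duplicate list is empty when keys is Nodup.
theorem dup_nil (keys : List String) (hnd : keys.Nodup) :
    (((PySem.Dict.counter keys).items).filter (fun kc => kc.2 > 1)).map (fun kc => kc.1)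
      = [] := by
  rw [PySem.Dict.items_counter]
  rw [List.map_eq_nil_iff, List.filter_eq_nil_iff]
  intro kc hkc
  rw [List.mem_map] at hkc
  obtain ⟨k, hk, rfl⟩ := hkc
  have hkmem : k ∈ keys := (PySem.Set.mem_ofList _ _).mp hk
  have : keys.count k = 1 := List.count_eq_one_of_mem hnd hkmem
  simp [this]

-- ===== VERDICT =====
theorem normalized_rule_keys_spec : Claim_equal_normalized_rule_keys := by
  intro rule_keys _ hpre
  obtain ⟨hne, hnd⟩ := hpre
  unfold Spec_normalized_rule_keys normalized_rule_keys normalized_rule_keys_alt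
  rw [keys_fold rule_keys []]
  simp only [List.nil_append]
  have hsnd : (PySem.List.sorted
      ((rule_keys.map (fun k => PySem.Str.strip k)).filter (fun s => s ≠ ""))
      (fun x => x) false).Nodup :=
    List.Perm.nodup (PySem.List.sorted_perm
      ((rule_keys.map (fun k => PySem.Str.strip k)).filter (fun s => s ≠ ""))
      (fun x => x) false).symm hnd
  rw [dup_nil _ hnd, adjScan_nodup _ _ hsnd]
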